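-- pv_equiv track=rewrite | github.com/rewonderful/MLC | src/huawei/problem_1.py | solution
-- ===== SOURCE A (Python) =====
-- def check1(nums):
--     is_single = False
--     for num in nums:
--         if num > 0 and num < 10:
--             if is_single:
--                 return False
--             else:
--                 is_single = not is_single
--         else:
--             if not is_single:
--                 return False
--             else:
--                 is_single = not is_single
--     return True
--
-- def check2(nums):
--     if nums[0] < 10 and  nums[-1] < 10:
--         for i  in range(1,len(nums)-1):
--             num = nums[i]
--             if num < 10:
--                 return False
--         return True
--     return False
--
-- def check3(nums):
--     if nums[0] >= 10 and nums[-1] >= 10: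
--         for i in range(1, len(nums) - 1):
--             num = nums[i]
--             if num >= 10:
--                 return False
--         return True
--     return False
--
-- def solution(nums):
--     ans = []
--     for num_list in nums:
--         if check1(num_list) or check2(num_list) or check3(num_list):
--             ans.append("true")
--         else:
--             ans.append("false")
--     return " ".join(ans)
-- ===== SOURCE B (Python) =====
-- def solution(nums):
--     def judge(xs):
--         n = len(xs)
--         # build the expected boolean templates and compare wholesale
--         alt = ([True, False] * ((n + 1) // 2))[:n]
--         edge = [True] + [False] * (n - 2) + [True] if n >= 2 else [True] * n
--         p1 = [0 < x < 10 for x in xs]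
--         p2 = [x < 10 for x in xs]
--         return p1 == alt or p2 == edge or p2 == [not b for b in edge]
--     return " ".join("true" if judge(xs) else "false" for xs in nums)
-- ===== Notes on version B (the rewrite author's own statement) =====
-- stated objective: alternative
-- what changed: B builds, per sublist, the expected boolean template lists (an alternating [True,False,...] pattern and an endpoints-True/middle-False edge pattern plus its negation) and decides each check by whole-list equality against the sublist's boolean image, instead of A's stateful toggle loop and index-range scans with early returns.
import Mathlib
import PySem

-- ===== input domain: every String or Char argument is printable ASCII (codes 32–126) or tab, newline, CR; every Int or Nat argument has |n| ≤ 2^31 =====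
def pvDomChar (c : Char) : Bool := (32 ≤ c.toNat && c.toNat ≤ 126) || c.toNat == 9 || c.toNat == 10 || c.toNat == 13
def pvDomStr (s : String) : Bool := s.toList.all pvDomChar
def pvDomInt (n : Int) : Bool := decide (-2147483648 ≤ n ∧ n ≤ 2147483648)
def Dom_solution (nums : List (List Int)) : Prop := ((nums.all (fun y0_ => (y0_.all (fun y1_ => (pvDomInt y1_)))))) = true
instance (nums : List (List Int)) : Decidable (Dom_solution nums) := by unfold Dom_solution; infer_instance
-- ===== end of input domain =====

-- B decides each check by building the expected boolean template list (alternating pattern,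
-- endpoints/middle edge pattern and its negation) and comparing it wholesale with the sublist's
-- boolean image, instead of A's stateful toggle loop and index-range scans; objective: alternative.


-- ===== PORT A =====
-- check1's loop with its is_single state, as structural recursion over nums
def check1Loop : List Int → Bool → Bool
  | [], _ => true
  | n :: rest, s =>
    if 0 < n ∧ n < 10 then
      if s then false else check1Loop rest true
    else
      if !s then false else check1Loop rest false

def check1 (nums : List Int) : Bool := check1Loop nums false

-- check2's inner for-loop over the index list range(1, len(nums)-1)
-- (none from pyGet? = IndexError; unreachable here since the indices are in range)
def check2Loop (nums : List Int) : List Int → Bool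
  | [] => true
  | i :: is =>
    match PySem.List.pyGet? nums i with
    | some num => if num < 10 then false else check2Loop nums is
    | none => false

-- nums[0] / nums[-1] via pyGet?: solution only calls check2/check3 on nonempty lists
-- (check1 short-circuits to True on []), so the none (= IndexError) arm is unreachable
def check2 (nums : List Int) : Bool :=
  match PySem.List.pyGet? nums 0, PySem.List.pyGet? nums (-1) with
  | some a, some b =>
    if a < 10 ∧ b < 10 then
      check2Loop nums (PySem.List.pyRange 1 ((nums.length : Int) - 1) 1)
    else false
  | _, _ => false

def check3Loop (nums : List Int) : List Int → Bool
  | [] => true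
  | i :: is =>
    match PySem.List.pyGet? nums i with
    | some num => if num ≥ 10 then false else check3Loop nums is
    | none => false

def check3 (nums : List Int) : Bool :=
  match PySem.List.pyGet? nums 0, PySem.List.pyGet? nums (-1) with
  | some a, some b =>
    if a ≥ 10 ∧ b ≥ 10 then
      check3Loop nums (PySem.List.pyRange 1 ((nums.length : Int) - 1) 1)
    else false
  | _, _ => false

def solution (nums : List (List Int)) : String :=
  PySem.Str.join " "
    (nums.foldl
      (fun ans numList =>
        ans ++ [if check1 numList || check2 numList || check3 numList then "true" else "false"])
      [])

-- ===== PORT B =====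
-- per-list judge of Source B: build the expected boolean templates, compare wholesale.
-- alt = ([True, False] * ((n+1)//2))[:n]; edge = [True]+[False]*(n-2)+[True] if n>=2 else [True]*n
def judgeB (xs : List Int) : Bool :=
  let n := xs.length
  let alt := ((List.replicate ((n + 1) / 2) [true, false]).flatten).take n
  let edge := if 2 ≤ n then [true] ++ List.replicate (n - 2) false ++ [true]
              else List.replicate n true
  let p1 := xs.map (fun x => decide (0 < x) && decide (x < 10))
  let p2 := xs.map (fun x => decide (x < 10))
  decide (p1 = alt) || decide (p2 = edge) || decide (p2 = edge.map (fun b => !b))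

def solution_alt (nums : List (List Int)) : String :=
  PySem.Str.join " " (nums.map (fun xs => if judgeB xs then "true" else "false"))

-- ===== PRECONDITION & SPEC =====
def Spec_solution (nums : List (List Int)) (out : String) : Prop := out = solution_alt nums
instance (nums : List (List Int)) (out : String) : Decidable (Spec_solution nums out) := by unfold Spec_solution; infer_instance

-- ===== CLAIM (what is proved, stated in full; the proofs are below) =====
def Claim_equal_solution : Prop := ∀ (nums : List (List Int)), Dom_solution nums → Spec_solution nums (solution nums)

-- ===== LEMMAS AND PROOFS =====

-- proof-only abbreviations for B's element predicates and templates
def predB (x : Int) : Bool := decide (0 < x) && decide (x < 10)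
def smallB (x : Int) : Bool := decide (x < 10)
def edgePat (n : Nat) : List Bool :=
  if 2 ≤ n then [true] ++ List.replicate (n - 2) false ++ [true] else List.replicate n true

-- alternating template starting with bit b
def altFrom : Nat → Bool → List Bool
  | 0, _ => []
  | n + 1, b => b :: altFrom n (!b)

theorem judgeB_eq (xs : List Int) :
    judgeB xs =
      (decide (xs.map predB = ((List.replicate ((xs.length + 1) / 2) [true, false]).flatten).take xs.length)
       || decide (xs.map smallB = edgePat xs.length)
       || decide (xs.map smallB = (edgePat xs.length).map (fun b => !b))) := rfl

-- A's toggle loop equals comparison with the alternating template starting at ¬state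
theorem check1Loop_eq_tmpl (xs : List Int) : ∀ (s : Bool),
    check1Loop xs s = decide (xs.map predB = altFrom xs.length (!s)) := by
  induction xs with
  | nil => intro s; simp [check1Loop, altFrom]
  | cons x t ih =>
    intro s
    by_cases hx : 0 < x ∧ x < 10
    · have hp : predB x = true := by simp [predB, hx.1, hx.2]
      cases s with
      | false =>
        simp only [check1Loop, if_pos hx, Bool.false_eq_true, if_false, ih true]
        simp [altFrom, hp]
      | true =>
        simp only [check1Loop, if_pos hx, if_true]
        simp [altFrom, hp]
    · have hp : predB x = false := by
        rcases not_and_or.mp hx with h | h <;> simp [predB, h]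
      cases s with
      | false =>
        simp only [check1Loop, if_neg hx, Bool.not_false, if_true]
        simp [altFrom, hp]
      | true =>
        simp only [check1Loop, if_neg hx, Bool.not_true, Bool.false_eq_true, if_false, ih false]
        simp [altFrom, hp]

-- B's repeated-pair-then-truncate construction yields the same alternating template
theorem take_replicate_pair (k : Nat) : ∀ (n : Nat), n ≤ 2 * k →
    ((List.replicate k [true, false]).flatten).take n = altFrom n true := by
  induction k with
  | zero => intro n hn; interval_cases n; simp [altFrom]
  | succ k ih =>
    intro n hn
    match n with
    | 0 => simp [altFrom]
    | 1 => simp [altFrom, List.replicate_succ]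
    | n + 2 =>
      have : ((List.replicate (k + 1) [true, false]).flatten).take (n + 2)
          = true :: false :: ((List.replicate k [true, false]).flatten).take n := by
        simp [List.replicate_succ]
      rw [this, ih n (by omega)]
      rfl

theorem check1_eq (xs : List Int) :
    check1 xs =
      decide (xs.map predB =
        ((List.replicate ((xs.length + 1) / 2) [true, false]).flatten).take xs.length) := by
  rw [check1, check1Loop_eq_tmpl xs false,
    take_replicate_pair ((xs.length + 1) / 2) xs.length (by omega)]
  rfl

-- A's index loops are an 'all' over the index list
theorem check2Loop_eq_all (nums : List Int) (L : List Int) :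
    check2Loop nums L =
      L.all (fun i => match PySem.List.pyGet? nums i with
        | some v => !(v < 10)
        | none => false) := by
  induction L with
  | nil => rfl
  | cons i is ih =>
    simp only [check2Loop, List.all_cons, ih]
    cases PySem.List.pyGet? nums i with
    | none => rfl
    | some v => by_cases h : v < 10 <;> simp [h]

theorem check3Loop_eq_all (nums : List Int) (L : List Int) :
    check3Loop nums L =
      L.all (fun i => match PySem.List.pyGet? nums i with
        | some v => !(v ≥ 10)
        | none => false) := by
  induction L with
  | nil => rfl
  | cons i is ih =>
    simp only [check3Loop, List.all_cons, ih]
    cases PySem.List.pyGet? nums i with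
    | none => rfl
    | some v => by_cases h : v ≥ 10 <;> simp [h]

theorem pyGet?_nat (xs : List Int) (n : Nat) (h : n < xs.length) :
    PySem.List.pyGet? xs (n : Int) = some xs[n] := by
  simp [pysem]

-- an 'all' over range(1, len-1) of a test on nums[i] is an 'all' over the middle slice
theorem range_all_eq_mid (xs : List Int) (p : Int → Bool) :
    (PySem.List.pyRange 1 ((xs.length : Int) - 1) 1).all
        (fun i => match PySem.List.pyGet? xs i with
          | some v => p v
          | none => false)
      = (xs.tail.dropLast.all p) := by
  rw [Bool.eq_iff_iff]
  simp only [List.all_eq_true]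
  constructor
  · intro h v hv
    rw [List.mem_iff_getElem] at hv
    obtain ⟨j, hj, rfl⟩ := hv
    have hjlen : j + 1 < xs.length := by
      have h1 := xs.tail.length_dropLast
      have h2 := xs.length_tail
      omega
    have hmem : ((j : Int) + 1) ∈ PySem.List.pyRange 1 ((xs.length : Int) - 1) 1 := by
      rw [PySem.List.mem_pyRange_one]
      refine ⟨by omega, ?_⟩
      have h1 := xs.tail.length_dropLast
      have h2 := xs.length_tail
      omega
    have := h _ hmem
    have hget : PySem.List.pyGet? xs ((j : Int) + 1) = some xs[j + 1] := by
      rw [show ((j : Int) + 1) = ((j + 1 : Nat) : Int) by omega]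
      exact pyGet?_nat xs (j + 1) hjlen
    rw [hget] at this
    have hval : xs.tail.dropLast[j] = xs[j + 1] := by
      rw [List.getElem_dropLast, List.getElem_tail]
    rw [hval]
    exact this
  · intro h i hi
    rw [PySem.List.mem_pyRange_one] at hi
    obtain ⟨h1, h2⟩ := hi
    set j : Nat := i.toNat - 1 with hj
    have hieq : i = ((j + 1 : Nat) : Int) := by omega
    have hjlen : j + 1 < xs.length := by omega
    have hget : PySem.List.pyGet? xs i = some xs[j + 1] := by
      rw [hieq]; exact pyGet?_nat xs (j + 1) hjlen
    rw [hget]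
    have hjmid : j < xs.tail.dropLast.length := by
      have h1 := xs.tail.length_dropLast
      have h2 := xs.length_tail
      omega
    have hval : xs.tail.dropLast[j] = xs[j + 1] := by
      rw [List.getElem_dropLast, List.getElem_tail]
    have := h _ (List.getElem_mem hjmid)
    rw [hval] at this
    exact this

-- list-equality with an endpoints/middle template, split into the three pointwise conditions
theorem map_eq_tmpl (f : Int → Bool) (x : Int) (t : List Int) (ht : t ≠ []) (a b : Bool) :
    ((x :: t).map f = a :: (List.replicate (t.length - 1) b ++ [a])) ↔
      (f x = a ∧ f (t.getLast ht) = a ∧ ∀ v ∈ t.dropLast, f v = b) := by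
  have key : (x :: t).map f = f x :: (t.dropLast.map f ++ [f (t.getLast ht)]) := by
    conv_lhs =>
      rw [show t = t.dropLast ++ [t.getLast ht] from (List.dropLast_concat_getLast ht).symm]
    simp
  rw [key]
  simp only [List.cons.injEq]
  constructor
  · rintro ⟨h1, h2⟩
    have hlen : (t.dropLast.map f).length = (List.replicate (t.length - 1) b).length := by
      simp
    obtain ⟨hm, hs⟩ := List.append_inj h2 hlen
    refine ⟨h1, by simpa using hs, ?_⟩
    rw [show (t.length - 1) = t.dropLast.length by simp] at hm
    exact fun v hv => (List.map_eq_replicate_iff.mp hm) v hv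
  · rintro ⟨h1, h2, h3⟩
    refine ⟨h1, ?_⟩
    have hm : t.dropLast.map f = List.replicate (t.length - 1) b := by
      rw [show (t.length - 1) = t.dropLast.length by simp]
      exact List.map_eq_replicate_iff.mpr h3
    rw [hm, h2]

-- A's check2 equals B's edge-template comparison (nonempty input)
theorem check2_eq (x : Int) (t : List Int) :
    check2 (x :: t) = decide ((x :: t).map smallB = edgePat (x :: t).length) := by
  have hne : x :: t ≠ [] := by simp
  have h0 : PySem.List.pyGet? (x :: t) (0 : Int) = some x := by simp [pysem]
  have hL : PySem.List.pyGet? (x :: t) (-1 : Int) = some ((x :: t).getLast hne) := by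
    simp [pysem, List.getLast_eq_getElem]; rfl
  unfold check2
  rw [h0, hL]
  dsimp only
  cases t with
  | nil =>
    -- single element: edge template is [true]
    by_cases hx : x < 10 <;>
      simp [edgePat, check2Loop, PySem.List.pyRange, smallB, List.getLast, hx]
  | cons y u =>
    set t := y :: u with htdef
    have htne : t ≠ [] := by simp [htdef]
    have hlast : (x :: t).getLast hne = t.getLast htne := List.getLast_cons htne
    have hlen : (x :: t).length = t.length + 1 := rfl
    have hedge : edgePat (x :: t).length =
        true :: (List.replicate (t.length - 1) false ++ [true]) := by
      simp only [edgePat, hlen]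
      rw [if_pos (by simp [htdef])]
      simp [htdef]
    rw [hedge, hlast]
    have hmid : check2Loop (x :: t) (PySem.List.pyRange 1 (((x :: t).length : Int) - 1) 1)
        = t.dropLast.all (fun v => !(v < 10)) := by
      rw [check2Loop_eq_all, range_all_eq_mid (x :: t) (fun v => !(v < 10))]
      rfl
    rw [Bool.eq_iff_iff]
    rw [decide_eq_true_iff, map_eq_tmpl smallB x t htne true false]
    by_cases hx : x < 10 <;> by_cases hl : t.getLast htne < 10
    · rw [if_pos ⟨hx, hl⟩, hmid]
      simp only [List.all_eq_true, smallB, hx, hl, decide_true, true_and]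
      constructor
      · intro h v hv; have := h v hv; simpa using this
      · intro h v hv; have := h v hv; simpa using this
    · rw [if_neg (by omega)]; simp [smallB, hx, hl]
    · rw [if_neg (by omega)]; simp [smallB, hx, hl]
    · rw [if_neg (by omega)]; simp [smallB, hx, hl]

-- A's check3 equals B's negated-edge-template comparison (nonempty input)
theorem check3_eq (x : Int) (t : List Int) :
    check3 (x :: t) = decide ((x :: t).map smallB = (edgePat (x :: t).length).map (fun b => !b)) := by
  have hne : x :: t ≠ [] := by simp
  have h0 : PySem.List.pyGet? (x :: t) (0 : Int) = some x := by simp [pysem]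
  have hL : PySem.List.pyGet? (x :: t) (-1 : Int) = some ((x :: t).getLast hne) := by
    simp [pysem, List.getLast_eq_getElem]; rfl
  unfold check3
  rw [h0, hL]
  dsimp only
  cases t with
  | nil =>
    by_cases hx : x ≥ 10 <;>
      simp [edgePat, check3Loop, PySem.List.pyRange, smallB, List.getLast, hx]
  | cons y u =>
    set t := y :: u with htdef
    have htne : t ≠ [] := by simp [htdef]
    have hlast : (x :: t).getLast hne = t.getLast htne := List.getLast_cons htne
    have hlen : (x :: t).length = t.length + 1 := rfl
    have hedge : (edgePat (x :: t).length).map (fun b => !b) =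
        false :: (List.replicate (t.length - 1) true ++ [false]) := by
      simp only [edgePat, hlen]
      rw [if_pos (by simp [htdef])]
      simp [htdef]
    rw [hedge, hlast]
    have hmid : check3Loop (x :: t) (PySem.List.pyRange 1 (((x :: t).length : Int) - 1) 1)
        = t.dropLast.all (fun v => !(v ≥ 10)) := by
      rw [check3Loop_eq_all, range_all_eq_mid (x :: t) (fun v => !(v ≥ 10))]
      rfl
    rw [Bool.eq_iff_iff]
    rw [decide_eq_true_iff, map_eq_tmpl smallB x t htne false true]
    by_cases hx : x ≥ 10 <;> by_cases hl : t.getLast htne ≥ 10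
    · rw [if_pos ⟨hx, hl⟩, hmid]
      simp only [List.all_eq_true, smallB]
      constructor
      · intro h
        refine ⟨by simp; omega, by simp; omega, fun v hv => ?_⟩
        have := h v hv; simp at this ⊢; omega
      · rintro ⟨-, -, h3⟩ v hv
        have := h3 v hv; simp at this ⊢; omega
    · rw [if_neg (by omega)]; simp [smallB]; intro _ h; omega
    · rw [if_neg (by omega)]; simp [smallB]; intro h; omega
    · rw [if_neg (by omega)]; simp [smallB]; intro h; omega

-- per-list agreement of the two judgements
theorem judge_eq (xs : List Int) :
    (check1 xs || check2 xs || check3 xs) = judgeB xs := by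
  rw [judgeB_eq]
  cases xs with
  | nil => decide
  | cons x t =>
    rw [check1_eq, check2_eq, check3_eq]

-- A's foldl-append accumulator is a map
theorem solution_eq_map (nums : List (List Int)) :
    solution nums =
      PySem.Str.join " "
        (nums.map (fun l => if check1 l || check2 l || check3 l then "true" else "false")) := by
  unfold solution
  rw [PySem.List.foldl_append_singleton_eq_map, List.nil_append]

-- ===== VERDICT (by name: the statement is the Claim_ definition above) =====
theorem solution_spec : Claim_equal_solution := by
  intro nums _
  unfold Spec_solution solution_alt
  rw [solution_eq_map]
  congr 1
  exact List.map_congr_left (fun xs _ => by rw [judge_eq])
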